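-- pv_equiv track=rewrite | github.com/pramodgs91/car-insurance-chatbot | backend/extraction.py | merge_into_session
-- ===== SOURCE A (Python) =====
-- from typing import Any
--
-- def merge_into_session(session_data: dict, extracted: dict) -> dict:
--     """
--     Translate extracted fields into the session_data shape that
--     get_required_fields expects. Returns the subset actually applied.
--     """
--     applied: dict[str, Any] = {}
--     filled = session_data.setdefault("filled_fields", {})
--
--     if extracted.get("registration_number"):
--         filled["registration_number"] = extracted["registration_number"]
--         applied["registration_number"] = extracted["registration_number"]
--
--     if extracted.get("policy_type") and extracted["policy_type"] != "unknown":
--         filled["previous_policy_type"] = extracted["policy_type"]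
--         applied["previous_policy_type"] = extracted["policy_type"]
--
--     if extracted.get("previous_insurer"):
--         filled["previous_insurer"] = extracted["previous_insurer"]
--         applied["previous_insurer"] = extracted["previous_insurer"]
--
--     if extracted.get("previous_policy_number"):
--         filled["previous_policy_number"] = extracted["previous_policy_number"]
--         applied["previous_policy_number"] = extracted["previous_policy_number"]
--
--     if extracted.get("policy_expiry_date"):
--         filled["previous_policy_expiry"] = extracted["policy_expiry_date"]
--         applied["previous_policy_expiry"] = extracted["policy_expiry_date"]
--
--     if extracted.get("ncb_percent"):
--         filled["ncb_percent"] = extracted["ncb_percent"]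
--         applied["ncb_percent"] = extracted["ncb_percent"]
--
--     if extracted.get("claims_made") in ("yes", "no"):
--         filled["claim_made"] = extracted["claims_made"]
--         applied["claim_made"] = extracted["claims_made"]
--
--     if extracted.get("nominee_name"):
--         filled["nominee_name"] = extracted["nominee_name"]
--         applied["nominee_name"] = extracted["nominee_name"]
--
--     if extracted.get("nominee_relation"):
--         filled["nominee_relation"] = extracted["nominee_relation"]
--         applied["nominee_relation"] = extracted["nominee_relation"]
--
--     # Car info (from RC) goes into the same slot the get_car_details tool
--     # populates — so the agent can skip the lookup call.
--     car_fields = {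
--         k: extracted[k]
--         for k in ("registration_number", "make", "model", "variant",
--                   "year", "fuel_type", "owner_name", "rto_code")
--         if k in extracted
--     }
--     if car_fields:
--         existing = session_data.get("car_info") or {}
--         session_data["car_info"] = {**existing, **car_fields, "source": "user_upload"}
--
--     return applied
-- ===== SOURCE B (Python) =====
-- # Single input-driven pass: scan extracted.items() once, classify each entry
-- # through a key-mapping table, then emit the picked fields in canonical order.
-- # Mutates session_data the same way A does (filled_fields update, car_info merge).
--
-- _DST = {
--     "registration_number": "registration_number",
--     "policy_type": "previous_policy_type",
--     "previous_insurer": "previous_insurer",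
--     "previous_policy_number": "previous_policy_number",
--     "policy_expiry_date": "previous_policy_expiry",
--     "ncb_percent": "ncb_percent",
--     "claims_made": "claim_made",
--     "nominee_name": "nominee_name",
--     "nominee_relation": "nominee_relation",
-- }
-- _ORDER = list(_DST.values())
--
-- _CAR_KEYS = ("registration_number", "make", "model", "variant",
--              "year", "fuel_type", "owner_name", "rto_code")
--
--
-- def _accepts(k, v):
--     if k == "policy_type":
--         return bool(v) and v != "unknown"
--     if k == "claims_made":
--         return v in ("yes", "no")
--     return bool(v)
--
--
-- def merge_into_session(session_data: dict, extracted: dict) -> dict: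
--     picked = {}
--     for k, v in extracted.items():
--         dst = _DST.get(k)
--         if dst is not None and _accepts(k, v):
--             picked[dst] = v
--     applied = {d: picked[d] for d in _ORDER if d in picked}
--
--     filled = session_data.setdefault("filled_fields", {})
--     if applied:
--         filled.update(applied)
--
--     car_fields = {k: extracted[k] for k in _CAR_KEYS if k in extracted}
--     if car_fields:
--         existing = session_data.get("car_info") or {}
--         session_data["car_info"] = {**existing, **car_fields,
--                                     "source": "user_upload"}
--     return applied
-- ===== Notes on version B (the rewrite author's own statement) =====
-- stated objective: alternative
-- what changed: Instead of nine fixed-key if-blocks probing extracted, B makes one input-driven pass over extracted.items(), classifying each entry through a key-mapping table into picked, then emits the picked fields in canonical order; the car_info merge is kept as in A.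
import Mathlib
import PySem

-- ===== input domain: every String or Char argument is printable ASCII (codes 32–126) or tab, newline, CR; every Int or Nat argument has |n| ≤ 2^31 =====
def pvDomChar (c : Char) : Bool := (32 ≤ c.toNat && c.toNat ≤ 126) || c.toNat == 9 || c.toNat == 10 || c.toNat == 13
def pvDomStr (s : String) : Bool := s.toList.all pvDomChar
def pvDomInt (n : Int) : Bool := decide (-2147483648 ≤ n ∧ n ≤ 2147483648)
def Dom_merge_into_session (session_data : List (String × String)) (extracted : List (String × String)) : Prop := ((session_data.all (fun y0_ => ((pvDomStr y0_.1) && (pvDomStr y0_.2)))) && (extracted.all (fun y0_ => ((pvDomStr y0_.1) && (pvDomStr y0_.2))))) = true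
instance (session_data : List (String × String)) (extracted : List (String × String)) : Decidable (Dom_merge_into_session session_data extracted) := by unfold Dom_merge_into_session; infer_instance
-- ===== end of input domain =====

-- B replaces A's nine fixed-key if-blocks by a single input-driven pass over
-- extracted's items (classify each entry through a key map, then emit the
-- picked fields in canonical order): an alternative traversal, same cost;
-- equivalence is about the RETURN value only — Source B performs the same
-- in-place mutations of session_data as A.


-- Python truthiness of `extracted.get(k)` for an optional string
def pvTruthy (o : Option String) : Bool :=
  match o with
  | some s => s != ""
  | none => false

-- ===== PORT A =====
-- Transliteration of A's nine sequential if-blocks building `applied`.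
-- The in-place mutations of session_data (setdefault, car_info merge) are side
-- effects that do not reach the return value and are not modeled.
def merge_into_session (session_data : List (String × String)) (extracted : List (String × String)) : List (String × String) :=
  let e := PySem.Dict.ofList extracted
  let applied : PySem.Dict String String := PySem.Dict.empty
  let applied := if pvTruthy (e.get? "registration_number") then
      applied.insert "registration_number" ((e.get? "registration_number").getD "") else applied
  let applied := if pvTruthy (e.get? "policy_type") && ((e.get? "policy_type").getD "" != "unknown") then
      applied.insert "previous_policy_type" ((e.get? "policy_type").getD "") else applied
  let applied := if pvTruthy (e.get? "previous_insurer") then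
      applied.insert "previous_insurer" ((e.get? "previous_insurer").getD "") else applied
  let applied := if pvTruthy (e.get? "previous_policy_number") then
      applied.insert "previous_policy_number" ((e.get? "previous_policy_number").getD "") else applied
  let applied := if pvTruthy (e.get? "policy_expiry_date") then
      applied.insert "previous_policy_expiry" ((e.get? "policy_expiry_date").getD "") else applied
  let applied := if pvTruthy (e.get? "ncb_percent") then
      applied.insert "ncb_percent" ((e.get? "ncb_percent").getD "") else applied
  let applied := if (e.get? "claims_made" == some "yes" || e.get? "claims_made" == some "no") then
      applied.insert "claim_made" ((e.get? "claims_made").getD "") else applied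
  let applied := if pvTruthy (e.get? "nominee_name") then
      applied.insert "nominee_name" ((e.get? "nominee_name").getD "") else applied
  let applied := if pvTruthy (e.get? "nominee_relation") then
      applied.insert "nominee_relation" ((e.get? "nominee_relation").getD "") else applied
  applied.items

-- ===== PORT B =====
-- Source B's _DST key map (extracted key -> session key)
def pvDstMap : PySem.Dict String String := PySem.Dict.ofList
  [("registration_number", "registration_number"),
   ("policy_type", "previous_policy_type"),
   ("previous_insurer", "previous_insurer"),
   ("previous_policy_number", "previous_policy_number"),
   ("policy_expiry_date", "previous_policy_expiry"),
   ("ncb_percent", "ncb_percent"),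
   ("claims_made", "claim_made"),
   ("nominee_name", "nominee_name"),
   ("nominee_relation", "nominee_relation")]

-- Source B's _accepts(k, v)
def pvAccepts (k v : String) : Bool :=
  if k == "policy_type" then v != "" && v != "unknown"
  else if k == "claims_made" then v == "yes" || v == "no"
  else v != ""

-- Source B: one pass over extracted.items() into `picked`, then the ordered
-- comprehension {d: picked[d] for d in _ORDER if d in picked}  (_ORDER = _DST.values()).
def merge_into_session_alt (session_data : List (String × String)) (extracted : List (String × String)) : List (String × String) :=
  let e := PySem.Dict.ofList extracted
  let picked := e.items.foldl (fun (picked : PySem.Dict String String) kv =>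
      match pvDstMap.get? kv.1 with
      | some dst => if pvAccepts kv.1 kv.2 then picked.insert dst kv.2 else picked
      | none => picked) PySem.Dict.empty
  (pvDstMap.values.foldl (fun (applied : PySem.Dict String String) d =>
      match picked.get? d with
      | some v => applied.insert d v
      | none => applied) PySem.Dict.empty).items

-- ===== PRECONDITION & SPEC =====
def pvSrcKeys : List String :=
  ["registration_number", "policy_type", "previous_insurer", "previous_policy_number",
   "policy_expiry_date", "ncb_percent", "claims_made", "nominee_name", "nominee_relation"]

-- does any of the nine field rules fire? (then A writes into `filled`)
def pvAnyApplied (extracted : List (String × String)) : Bool :=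
  pvSrcKeys.any (fun k => match (PySem.Dict.ofList extracted).get? k with
    | some v => pvAccepts k v
    | none => false)

-- is any car-info key present? (then A rebuilds session_data["car_info"])
def pvAnyCar (extracted : List (String × String)) : Bool :=
  ["registration_number", "make", "model", "variant", "year", "fuel_type",
   "owner_name", "rto_code"].any (fun k => ((PySem.Dict.ofList extracted).get? k).isSome)

-- Pre_ excludes exactly the inputs on which A RAISES TypeError: session_data's
-- values are strings here, so writing into session_data["filled_fields"] or
-- splatting a truthy session_data["car_info"] fails; A returns on everything else.
def Pre_merge_into_session (session_data : List (String × String)) (extracted : List (String × String)) : Prop :=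
  ¬(((PySem.Dict.ofList session_data).get? "filled_fields").isSome = true ∧ pvAnyApplied extracted = true) ∧
  ¬(pvAnyCar extracted = true ∧ pvTruthy ((PySem.Dict.ofList session_data).get? "car_info") = true)
instance (session_data : List (String × String)) (extracted : List (String × String)) : Decidable (Pre_merge_into_session session_data extracted) := by unfold Pre_merge_into_session; infer_instance

def pvWitness_merge_into_session : (List (String × String)) × (List (String × String)) :=
  ([("customer", "alice")], [("registration_number", "KA01AB1234"), ("claims_made", "no")])

def Spec_merge_into_session (session_data : List (String × String)) (extracted : List (String × String)) (out : List (String × String)) : Prop := out = merge_into_session_alt session_data extracted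
instance (session_data : List (String × String)) (extracted : List (String × String)) (out : List (String × String)) : Decidable (Spec_merge_into_session session_data extracted out) := by unfold Spec_merge_into_session; infer_instance

-- ===== CLAIM (what is proved, stated in full; the proofs are below) =====
def Claim_equal_merge_into_session : Prop := ∀ (session_data : List (String × String)) (extracted : List (String × String)), Dom_merge_into_session session_data extracted → Pre_merge_into_session session_data extracted → Spec_merge_into_session session_data extracted (merge_into_session session_data extracted)

-- ===== LEMMAS AND PROOFS =====

-- lookup in a dict is first-match search in its items list
lemma pv_get?_eq_find? (d : PySem.Dict String String) (k : String) :
    d.get? k = (d.items.find? (fun p => p.1 == k)).map Prod.snd := by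
  obtain ⟨l⟩ := d
  induction l with
  | nil => rfl
  | cons p t ih =>
    rw [PySem.Dict.get?_mk_cons, List.find?_cons]
    by_cases h : p.1 == k
    · simp [h]
    · simpa [h] using ih

-- A's shape: conditionally inserting pairwise-distinct fresh keys appends in order
lemma pv_items_foldl_condInsert (l : List (String × Bool × String)) (acc : PySem.Dict String String)
    (hnd : (l.map (·.1)).Nodup) (hk : acc.keys.Nodup) (hf : ∀ p ∈ l, acc.contains p.1 = false) :
    (l.foldl (fun a p => if p.2.1 then a.insert p.1 p.2.2 else a) acc).items
      = acc.items ++ l.flatMap (fun p => if p.2.1 then [(p.1, p.2.2)] else []) := by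
  induction l generalizing acc with
  | nil => simp
  | cons p t ih =>
    simp only [List.map_cons, List.nodup_cons, List.mem_map] at hnd
    by_cases hb : p.2.1 = true
    · have hfp : acc.contains p.1 = false := hf p (by simp)
      simp only [List.foldl_cons, List.flatMap_cons, hb, if_true]
      rw [ih (acc.insert p.1 p.2.2) hnd.2 (PySem.Dict.nodup_keys_insert _ _ _ hk)
          (by
            intro q hq
            rw [PySem.Dict.contains_insert]
            have hne : q.1 ≠ p.1 := fun hqe => hnd.1 ⟨q, hq, hqe⟩
            simp [hne, hf q (by simp [hq])]),
          PySem.Dict.items_insert_of_not_contains _ _ hfp, List.append_assoc]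
    · simp only [List.foldl_cons, List.flatMap_cons, hb]
      exact ih acc hnd.2 hk (fun q hq => hf q (by simp [hq]))

-- B's emit shape: inserting distinct fresh keys when a lookup succeeds appends in order
lemma pv_items_foldl_optInsert (g : String → Option String) (l : List String) (acc : PySem.Dict String String)
    (hnd : l.Nodup) (hk : acc.keys.Nodup) (hf : ∀ d ∈ l, acc.contains d = false) :
    (l.foldl (fun a d => match g d with
        | some v => a.insert d v
        | none => a) acc).items
      = acc.items ++ l.flatMap (fun d => match g d with
        | some v => [(d, v)]
        | none => []) := by
  induction l generalizing acc with
  | nil => simp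
  | cons d t ih =>
    simp only [List.nodup_cons] at hnd
    cases hg : g d with
    | none =>
      simp only [List.foldl_cons, List.flatMap_cons, hg, List.nil_append]
      exact ih acc hnd.2 hk (fun q hq => hf q (by simp [hq]))
    | some v =>
      have hfd : acc.contains d = false := hf d (by simp)
      simp only [List.foldl_cons, List.flatMap_cons, hg]
      rw [ih (acc.insert d v) hnd.2 (PySem.Dict.nodup_keys_insert _ _ _ hk)
          (by
            intro q hq
            rw [PySem.Dict.contains_insert]
            have hne : q ≠ d := fun hqe => hnd.1 (hqe ▸ hq)
            simp [hne, hf q (by simp [hq])]),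
          PySem.Dict.items_insert_of_not_contains _ _ hfd, List.append_assoc]

-- entries whose key is not src never touch slot dst of `picked`
lemma pv_pick_skip (src dst : String) (hinj : ∀ k, k ≠ src → pvDstMap.get? k ≠ some dst)
    (l : List (String × String)) (acc : PySem.Dict String String) (hl : ∀ p ∈ l, p.1 ≠ src) :
    (l.foldl (fun (picked : PySem.Dict String String) kv =>
        match pvDstMap.get? kv.1 with
        | some d => if pvAccepts kv.1 kv.2 then picked.insert d kv.2 else picked
        | none => picked) acc).get? dst = acc.get? dst := by
  induction l generalizing acc with
  | nil => rfl
  | cons p t ih =>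
    have hstep : (match pvDstMap.get? p.1 with
        | some d => if pvAccepts p.1 p.2 then acc.insert d p.2 else acc
        | none => acc).get? dst = acc.get? dst := by
      cases hd : pvDstMap.get? p.1 with
      | none => rfl
      | some d =>
        have hne : dst ≠ d := by
          intro he
          exact hinj p.1 (hl p (by simp)) (he ▸ hd)
        by_cases ha : pvAccepts p.1 p.2 <;> simp [ha, PySem.Dict.get?_insert_of_ne _ _ hne]
    rw [List.foldl_cons, ih _ (fun q hq => hl q (by simp [hq])), hstep]

-- what the single pass leaves in slot dst: the (unique) src entry, if accepted
lemma pv_pick_get (src dst : String) (hsrc : pvDstMap.get? src = some dst)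
    (hinj : ∀ k, k ≠ src → pvDstMap.get? k ≠ some dst)
    (l : List (String × String)) (hnd : (l.map (·.1)).Nodup) (acc : PySem.Dict String String) :
    (l.foldl (fun (picked : PySem.Dict String String) kv =>
        match pvDstMap.get? kv.1 with
        | some d => if pvAccepts kv.1 kv.2 then picked.insert d kv.2 else picked
        | none => picked) acc).get? dst
      = match l.find? (fun p => p.1 == src) with
        | some p => if pvAccepts src p.2 then some p.2 else acc.get? dst
        | none => acc.get? dst := by
  induction l generalizing acc with
  | nil => rfl
  | cons p t ih =>
    simp only [List.map_cons, List.nodup_cons, List.mem_map] at hnd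
    by_cases hk : p.1 = src
    · have hfind : List.find? (fun q => q.1 == src) (p :: t) = some p :=
        List.find?_cons_of_pos (by simp [hk])
      rw [hfind, List.foldl_cons]
      have hnosrc : ∀ q ∈ t, q.1 ≠ src := by
        intro q hq he
        exact hnd.1 ⟨q, hq, he.trans hk.symm⟩
      rw [pv_pick_skip src dst hinj t _ hnosrc]
      rw [hk, hsrc]
      by_cases ha : pvAccepts src p.2 <;> simp [ha, PySem.Dict.get?_insert_self]
    · have hfind : List.find? (fun q => q.1 == src) (p :: t) = List.find? (fun q => q.1 == src) t :=
        List.find?_cons_of_neg (by simp [hk])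
      have hstep : (match pvDstMap.get? p.1 with
          | some d => if pvAccepts p.1 p.2 then acc.insert d p.2 else acc
          | none => acc).get? dst = acc.get? dst := by
        cases hd : pvDstMap.get? p.1 with
        | none => rfl
        | some d =>
          have hne : dst ≠ d := fun he => hinj p.1 hk (he ▸ hd)
          by_cases ha : pvAccepts p.1 p.2 <;> simp [ha, PySem.Dict.get?_insert_of_ne _ _ hne]
      rw [hfind, List.foldl_cons, ih hnd.2 _, hstep]

-- proof-only helpers: A's nine blocks as a (dst, condition, value) table,
-- and B's first pass as a named dict
def pvAList (e : PySem.Dict String String) : List (String × Bool × String) :=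
  [("registration_number", pvTruthy (e.get? "registration_number"), (e.get? "registration_number").getD ""),
   ("previous_policy_type", pvTruthy (e.get? "policy_type") && ((e.get? "policy_type").getD "" != "unknown"), (e.get? "policy_type").getD ""),
   ("previous_insurer", pvTruthy (e.get? "previous_insurer"), (e.get? "previous_insurer").getD ""),
   ("previous_policy_number", pvTruthy (e.get? "previous_policy_number"), (e.get? "previous_policy_number").getD ""),
   ("previous_policy_expiry", pvTruthy (e.get? "policy_expiry_date"), (e.get? "policy_expiry_date").getD ""),
   ("ncb_percent", pvTruthy (e.get? "ncb_percent"), (e.get? "ncb_percent").getD ""),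
   ("claim_made", (e.get? "claims_made" == some "yes" || e.get? "claims_made" == some "no"), (e.get? "claims_made").getD ""),
   ("nominee_name", pvTruthy (e.get? "nominee_name"), (e.get? "nominee_name").getD ""),
   ("nominee_relation", pvTruthy (e.get? "nominee_relation"), (e.get? "nominee_relation").getD "")]

def pvPicked (ext : List (String × String)) : PySem.Dict String String :=
  (PySem.Dict.ofList ext).items.foldl (fun picked kv =>
      match pvDstMap.get? kv.1 with
      | some dst => if pvAccepts kv.1 kv.2 then picked.insert dst kv.2 else picked
      | none => picked) PySem.Dict.empty

-- closed form of the key map on an arbitrary key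
lemma pv_dst_char (k : String) : pvDstMap.get? k =
    if "registration_number" == k then some "registration_number"
    else if "policy_type" == k then some "previous_policy_type"
    else if "previous_insurer" == k then some "previous_insurer"
    else if "previous_policy_number" == k then some "previous_policy_number"
    else if "policy_expiry_date" == k then some "previous_policy_expiry"
    else if "ncb_percent" == k then some "ncb_percent"
    else if "claims_made" == k then some "claim_made"
    else if "nominee_name" == k then some "nominee_name"
    else if "nominee_relation" == k then some "nominee_relation"
    else none := by
  have h : pvDstMap = PySem.Dict.mk
      [("registration_number", "registration_number"),
       ("policy_type", "previous_policy_type"),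
       ("previous_insurer", "previous_insurer"),
       ("previous_policy_number", "previous_policy_number"),
       ("policy_expiry_date", "previous_policy_expiry"),
       ("ncb_percent", "ncb_percent"),
       ("claims_made", "claim_made"),
       ("nominee_name", "nominee_name"),
       ("nominee_relation", "nominee_relation")] := rfl
  rw [h]
  simp only [PySem.Dict.get?_mk_cons]
  rfl

-- block-equality lemmas: one per predicate shape
lemma pv_block_truthy (dst : String) (q : String → Bool) (hq : ∀ v, q v = (v != ""))
    (f : Option (String × String)) :
    (if pvTruthy (f.map Prod.snd) then [(dst, (f.map Prod.snd).getD "")] else [])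
    = match (match f with | some p => if q p.2 then some p.2 else none | none => none) with
      | some v => [(dst, v)]
      | none => ([] : List (String × String)) := by
  cases f with
  | none => simp [pvTruthy]
  | some p => by_cases h : p.2 = "" <;> simp [pvTruthy, hq, h]

lemma pv_block_policy (f : Option (String × String)) :
    (if pvTruthy (f.map Prod.snd) && ((f.map Prod.snd).getD "" != "unknown") then
        [("previous_policy_type", (f.map Prod.snd).getD "")] else [])
    = match (match f with | some p => if pvAccepts "policy_type" p.2 then some p.2 else none | none => none) with
      | some v => [("previous_policy_type", v)]
      | none => ([] : List (String × String)) := by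
  cases f with
  | none => simp [pvTruthy]
  | some p =>
    by_cases h1 : p.2 = "" <;> by_cases h2 : p.2 = "unknown" <;>
      simp [pvTruthy, pvAccepts, h1, h2]

lemma pv_block_claims (f : Option (String × String)) :
    (if (f.map Prod.snd == some "yes" || f.map Prod.snd == some "no") then
        [("claim_made", (f.map Prod.snd).getD "")] else [])
    = match (match f with | some p => if pvAccepts "claims_made" p.2 then some p.2 else none | none => none) with
      | some v => [("claim_made", v)]
      | none => ([] : List (String × String)) := by
  cases f with
  | none => simp
  | some p =>
    by_cases h1 : p.2 = "yes" <;> by_cases h2 : p.2 = "no" <;>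
      simp [pvAccepts, h1, h2]

lemma pv_inj_reg : ∀ k, k ≠ "registration_number" → pvDstMap.get? k ≠ some "registration_number" := by
  intro k hk h; rw [pv_dst_char] at h; split_ifs at h <;> simp_all

lemma pv_picked_reg (ext : List (String × String)) :
    (pvPicked ext).get? "registration_number" = (match (PySem.Dict.ofList ext).items.find? (fun p => p.1 == "registration_number") with
      | some p => if pvAccepts "registration_number" p.2 then some p.2 else none
      | none => none) := by
  unfold pvPicked
  rw [pv_pick_get "registration_number" "registration_number" rfl pv_inj_reg _ (PySem.Dict.nodup_keys_ofList ext)]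
  cases (PySem.Dict.ofList ext).items.find? (fun p => p.1 == "registration_number") <;>
    simp [PySem.Dict.get?_empty]

lemma pv_inj_pol : ∀ k, k ≠ "policy_type" → pvDstMap.get? k ≠ some "previous_policy_type" := by
  intro k hk h; rw [pv_dst_char] at h; split_ifs at h <;> simp_all

lemma pv_picked_pol (ext : List (String × String)) :
    (pvPicked ext).get? "previous_policy_type" = (match (PySem.Dict.ofList ext).items.find? (fun p => p.1 == "policy_type") with
      | some p => if pvAccepts "policy_type" p.2 then some p.2 else none
      | none => none) := by
  unfold pvPicked
  rw [pv_pick_get "policy_type" "previous_policy_type" rfl pv_inj_pol _ (PySem.Dict.nodup_keys_ofList ext)]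
  cases (PySem.Dict.ofList ext).items.find? (fun p => p.1 == "policy_type") <;>
    simp [PySem.Dict.get?_empty]

lemma pv_inj_ins : ∀ k, k ≠ "previous_insurer" → pvDstMap.get? k ≠ some "previous_insurer" := by
  intro k hk h; rw [pv_dst_char] at h; split_ifs at h <;> simp_all

lemma pv_picked_ins (ext : List (String × String)) :
    (pvPicked ext).get? "previous_insurer" = (match (PySem.Dict.ofList ext).items.find? (fun p => p.1 == "previous_insurer") with
      | some p => if pvAccepts "previous_insurer" p.2 then some p.2 else none
      | none => none) := by
  unfold pvPicked
  rw [pv_pick_get "previous_insurer" "previous_insurer" rfl pv_inj_ins _ (PySem.Dict.nodup_keys_ofList ext)]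
  cases (PySem.Dict.ofList ext).items.find? (fun p => p.1 == "previous_insurer") <;>
    simp [PySem.Dict.get?_empty]

lemma pv_inj_num : ∀ k, k ≠ "previous_policy_number" → pvDstMap.get? k ≠ some "previous_policy_number" := by
  intro k hk h; rw [pv_dst_char] at h; split_ifs at h <;> simp_all

lemma pv_picked_num (ext : List (String × String)) :
    (pvPicked ext).get? "previous_policy_number" = (match (PySem.Dict.ofList ext).items.find? (fun p => p.1 == "previous_policy_number") with
      | some p => if pvAccepts "previous_policy_number" p.2 then some p.2 else none
      | none => none) := by
  unfold pvPicked
  rw [pv_pick_get "previous_policy_number" "previous_policy_number" rfl pv_inj_num _ (PySem.Dict.nodup_keys_ofList ext)]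
  cases (PySem.Dict.ofList ext).items.find? (fun p => p.1 == "previous_policy_number") <;>
    simp [PySem.Dict.get?_empty]

lemma pv_inj_exp : ∀ k, k ≠ "policy_expiry_date" → pvDstMap.get? k ≠ some "previous_policy_expiry" := by
  intro k hk h; rw [pv_dst_char] at h; split_ifs at h <;> simp_all

lemma pv_picked_exp (ext : List (String × String)) :
    (pvPicked ext).get? "previous_policy_expiry" = (match (PySem.Dict.ofList ext).items.find? (fun p => p.1 == "policy_expiry_date") with
      | some p => if pvAccepts "policy_expiry_date" p.2 then some p.2 else none
      | none => none) := by
  unfold pvPicked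
  rw [pv_pick_get "policy_expiry_date" "previous_policy_expiry" rfl pv_inj_exp _ (PySem.Dict.nodup_keys_ofList ext)]
  cases (PySem.Dict.ofList ext).items.find? (fun p => p.1 == "policy_expiry_date") <;>
    simp [PySem.Dict.get?_empty]

lemma pv_inj_ncb : ∀ k, k ≠ "ncb_percent" → pvDstMap.get? k ≠ some "ncb_percent" := by
  intro k hk h; rw [pv_dst_char] at h; split_ifs at h <;> simp_all

lemma pv_picked_ncb (ext : List (String × String)) :
    (pvPicked ext).get? "ncb_percent" = (match (PySem.Dict.ofList ext).items.find? (fun p => p.1 == "ncb_percent") with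
      | some p => if pvAccepts "ncb_percent" p.2 then some p.2 else none
      | none => none) := by
  unfold pvPicked
  rw [pv_pick_get "ncb_percent" "ncb_percent" rfl pv_inj_ncb _ (PySem.Dict.nodup_keys_ofList ext)]
  cases (PySem.Dict.ofList ext).items.find? (fun p => p.1 == "ncb_percent") <;>
    simp [PySem.Dict.get?_empty]

lemma pv_inj_clm : ∀ k, k ≠ "claims_made" → pvDstMap.get? k ≠ some "claim_made" := by
  intro k hk h; rw [pv_dst_char] at h; split_ifs at h <;> simp_all

lemma pv_picked_clm (ext : List (String × String)) :
    (pvPicked ext).get? "claim_made" = (match (PySem.Dict.ofList ext).items.find? (fun p => p.1 == "claims_made") with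
      | some p => if pvAccepts "claims_made" p.2 then some p.2 else none
      | none => none) := by
  unfold pvPicked
  rw [pv_pick_get "claims_made" "claim_made" rfl pv_inj_clm _ (PySem.Dict.nodup_keys_ofList ext)]
  cases (PySem.Dict.ofList ext).items.find? (fun p => p.1 == "claims_made") <;>
    simp [PySem.Dict.get?_empty]

lemma pv_inj_nom : ∀ k, k ≠ "nominee_name" → pvDstMap.get? k ≠ some "nominee_name" := by
  intro k hk h; rw [pv_dst_char] at h; split_ifs at h <;> simp_all

lemma pv_picked_nom (ext : List (String × String)) :
    (pvPicked ext).get? "nominee_name" = (match (PySem.Dict.ofList ext).items.find? (fun p => p.1 == "nominee_name") with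
      | some p => if pvAccepts "nominee_name" p.2 then some p.2 else none
      | none => none) := by
  unfold pvPicked
  rw [pv_pick_get "nominee_name" "nominee_name" rfl pv_inj_nom _ (PySem.Dict.nodup_keys_ofList ext)]
  cases (PySem.Dict.ofList ext).items.find? (fun p => p.1 == "nominee_name") <;>
    simp [PySem.Dict.get?_empty]

lemma pv_inj_rel : ∀ k, k ≠ "nominee_relation" → pvDstMap.get? k ≠ some "nominee_relation" := by
  intro k hk h; rw [pv_dst_char] at h; split_ifs at h <;> simp_all

lemma pv_picked_rel (ext : List (String × String)) :
    (pvPicked ext).get? "nominee_relation" = (match (PySem.Dict.ofList ext).items.find? (fun p => p.1 == "nominee_relation") with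
      | some p => if pvAccepts "nominee_relation" p.2 then some p.2 else none
      | none => none) := by
  unfold pvPicked
  rw [pv_pick_get "nominee_relation" "nominee_relation" rfl pv_inj_rel _ (PySem.Dict.nodup_keys_ofList ext)]
  cases (PySem.Dict.ofList ext).items.find? (fun p => p.1 == "nominee_relation") <;>
    simp [PySem.Dict.get?_empty]

-- ===== VERDICT (by name: the statement is the Claim_ definition above) =====
theorem merge_into_session_spec : Claim_equal_merge_into_session := by
  intro sd ext _ _
  unfold Spec_merge_into_session
  have hndItems : (((PySem.Dict.ofList ext : PySem.Dict String String)).items.map (·.1)).Nodup :=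
    PySem.Dict.nodup_keys_ofList ext
  have hA : merge_into_session sd ext = ((pvAList (PySem.Dict.ofList ext)).foldl
      (fun a p => if p.2.1 then a.insert p.1 p.2.2 else a) PySem.Dict.empty).items := rfl
  have hB : merge_into_session_alt sd ext = (pvDstMap.values.foldl
      (fun a d => match (pvPicked ext).get? d with
        | some v => a.insert d v
        | none => a) PySem.Dict.empty).items := rfl
  have hndA : ((pvAList (PySem.Dict.ofList ext)).map (·.1)).Nodup := by
    have h : (pvAList (PySem.Dict.ofList ext)).map (·.1) =
      ["registration_number", "previous_policy_type", "previous_insurer",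
       "previous_policy_number", "previous_policy_expiry", "ncb_percent",
       "claim_made", "nominee_name", "nominee_relation"] := rfl
    rw [h]; decide
  have hvals : pvDstMap.values =
      ["registration_number", "previous_policy_type", "previous_insurer",
       "previous_policy_number", "previous_policy_expiry", "ncb_percent",
       "claim_made", "nominee_name", "nominee_relation"] := rfl
  have hndB : pvDstMap.values.Nodup := by rw [hvals]; decide
  rw [hA, hB, pv_items_foldl_condInsert _ _ hndA PySem.Dict.nodup_keys_empty
        (fun p _ => PySem.Dict.contains_empty _),
      pv_items_foldl_optInsert _ _ _ hndB PySem.Dict.nodup_keys_empty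
        (fun d _ => PySem.Dict.contains_empty _)]
  rw [hvals]
  simp only [pvAList, List.flatMap_cons, List.flatMap_nil, List.append_nil]
  rw [pv_picked_reg ext, pv_get?_eq_find? (PySem.Dict.ofList ext) "registration_number"]
  rw [pv_picked_pol ext, pv_get?_eq_find? (PySem.Dict.ofList ext) "policy_type"]
  rw [pv_picked_ins ext, pv_get?_eq_find? (PySem.Dict.ofList ext) "previous_insurer"]
  rw [pv_picked_num ext, pv_get?_eq_find? (PySem.Dict.ofList ext) "previous_policy_number"]
  rw [pv_picked_exp ext, pv_get?_eq_find? (PySem.Dict.ofList ext) "policy_expiry_date"]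
  rw [pv_picked_ncb ext, pv_get?_eq_find? (PySem.Dict.ofList ext) "ncb_percent"]
  rw [pv_picked_clm ext, pv_get?_eq_find? (PySem.Dict.ofList ext) "claims_made"]
  rw [pv_picked_nom ext, pv_get?_eq_find? (PySem.Dict.ofList ext) "nominee_name"]
  rw [pv_picked_rel ext, pv_get?_eq_find? (PySem.Dict.ofList ext) "nominee_relation"]
  rw [pv_block_truthy "registration_number" (pvAccepts "registration_number") (fun v => by simp [pvAccepts])]
  rw [pv_block_policy]
  rw [pv_block_truthy "previous_insurer" (pvAccepts "previous_insurer") (fun v => by simp [pvAccepts])]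
  rw [pv_block_truthy "previous_policy_number" (pvAccepts "previous_policy_number") (fun v => by simp [pvAccepts])]
  rw [pv_block_truthy "previous_policy_expiry" (pvAccepts "policy_expiry_date") (fun v => by simp [pvAccepts])]
  rw [pv_block_truthy "ncb_percent" (pvAccepts "ncb_percent") (fun v => by simp [pvAccepts])]
  rw [pv_block_claims]
  rw [pv_block_truthy "nominee_name" (pvAccepts "nominee_name") (fun v => by simp [pvAccepts])]
  rw [pv_block_truthy "nominee_relation" (pvAccepts "nominee_relation") (fun v => by simp [pvAccepts])]
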